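-- pv_equiv track=rewrite | github.com/socathie/CodeFights | Arcade/SortingOutpost/digitDifferenceSort.py | digitDifferenceSort
-- ===== SOURCE A (Python) =====
-- def digitDifferenceSort(a):
--     diff = [list(str(i)) for i in a]
--     for i in range(len(diff)):
--         diff[i] = [int(j) for j in diff[i]]
--         diff[i] = max(diff[i])-min(diff[i])
--     indices = [i for i in range(len(a))]
--     combined = [list(i) for i in zip(diff,a,indices)]
--     combined = sorted(combined,key = lambda x: (x[0],-x[2]))
--     a = [x[1] for x in combined]
--     return a
-- ===== SOURCE B (Python) =====
-- def digitDifferenceSort(a):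
--     def key(n):
--         ds = [int(c) for c in str(n)]
--         return max(ds) - min(ds)
--     out = []
--     for d in range(10):
--         for n in reversed(a):
--             if key(n) == d:
--                 out.append(n)
--     return out
-- ===== Notes on version B (the rewrite author's own statement) =====
-- stated objective: alternative
-- what changed: Replaces A's decorate-with-(diff,-index)-and-comparison-sort by a distribution (bucket) pass: since the digit max-min difference is always 0..9, B makes one scan of the reversed list per key value d=0..9 collecting the matches, so no sort is performed and the reverse-index tie-break falls out of the reversed scan order.
import Mathlib
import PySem

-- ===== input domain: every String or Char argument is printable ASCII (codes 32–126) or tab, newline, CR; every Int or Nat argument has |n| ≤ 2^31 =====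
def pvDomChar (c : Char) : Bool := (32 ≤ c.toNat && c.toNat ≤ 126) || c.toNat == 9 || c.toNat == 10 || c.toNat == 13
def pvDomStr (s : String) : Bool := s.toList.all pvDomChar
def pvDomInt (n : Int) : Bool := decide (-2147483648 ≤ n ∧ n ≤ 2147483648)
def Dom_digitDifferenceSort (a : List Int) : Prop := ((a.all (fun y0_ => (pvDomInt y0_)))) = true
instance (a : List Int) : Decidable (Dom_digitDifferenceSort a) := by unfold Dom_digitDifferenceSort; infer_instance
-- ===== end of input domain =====

-- B replaces A's decorate-with-(diff,-index) comparison sort by a distribution pass over the ten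
-- possible key values 0..9 (one scan of the reversed list per value; no sort). Objective: alternative.


-- ===== PORT A =====
-- Literal port of A.  int(j) on a single character is PySem.Int.ofChars? [j]; it is none exactly
-- where Python raises ValueError (the '-' of a negative number) — excluded by Pre_; max/min of the
-- nonempty digit list never raise, so .getD 0 is never taken on admitted inputs.
def digitDifferenceSort (a : List Int) : List Int :=
  let diff := a.map (fun i => PySem.Int.toChars i)
  let diff2 := diff.map (fun d => d.map (fun j => (PySem.Int.ofChars? [j]).getD 0))
  let diff3 := diff2.map (fun d =>
    ((PySem.List.max? d (fun x => x)).getD 0) - ((PySem.List.min? d (fun x => x)).getD 0))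
  let indices := PySem.List.pyRange 0 (a.length : Int) 1
  let combined := List.zip diff3 (List.zip a indices)
  let combined2 := PySem.List.sorted2 combined (fun x => x.1) (fun x => -x.2.2)
  combined2.map (fun x => x.2.1)

-- ===== PORT B =====
-- key(n) = max(digits of str(n)) - min(digits of str(n))
def pvDigitKey (n : Int) : Int :=
  let ds := (PySem.Int.toChars n).map (fun c => (PySem.Int.ofChars? [c]).getD 0)
  ((PySem.List.max? ds (fun x => x)).getD 0) - ((PySem.List.min? ds (fun x => x)).getD 0)

-- for d in range(10): for n in reversed(a): if key(n) == d: out.append(n)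
def digitDifferenceSort_alt (a : List Int) : List Int :=
  (PySem.List.pyRange 0 10 1).foldl (fun out d =>
    a.reverse.foldl (fun out n => if pvDigitKey n = d then out ++ [n] else out) out) []

-- ===== PRECONDITION & SPEC =====
-- Pre_ excludes lists with a negative element: there str(i) starts with '-' and int('-') raises
-- ValueError in A (and in B's key alike).
def Pre_digitDifferenceSort (a : List Int) : Prop := ∀ x ∈ a, 0 ≤ x
instance (a : List Int) : Decidable (Pre_digitDifferenceSort a) := by
  unfold Pre_digitDifferenceSort; infer_instance
def pvWitness_digitDifferenceSort : List Int := [21, 0, 13, 100]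

def Spec_digitDifferenceSort (a : List Int) (out : List Int) : Prop := out = digitDifferenceSort_alt a
instance (a : List Int) (out : List Int) : Decidable (Spec_digitDifferenceSort a out) := by
  unfold Spec_digitDifferenceSort; infer_instance

-- ===== CLAIM (what is proved, stated in full; the proofs are below) =====
def Claim_equal_digitDifferenceSort : Prop := ∀ (a : List Int), Dom_digitDifferenceSort a → Pre_digitDifferenceSort a → Spec_digitDifferenceSort a (digitDifferenceSort a)

-- ===== LEMMAS AND PROOFS =====

-- insertion before the first element of ≥ key (A's effective rule: its -index tie-break always fires)
def pvInsE (k : Int → Int) (x : Int) (l : List Int) : List Int :=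
  PySem.List.insertBy (fun a b => decide (k a ≤ k b)) x l

-- insertion before the first element of > key
def pvInsL (k : Int → Int) (x : Int) (l : List Int) : List Int :=
  PySem.List.insertBy (fun a b => decide (k a < k b)) x l

-- A's insertion rule on (diff, value, index) triples, exactly sorted2's comparison
def pvInsA (x : Int × Int × Int) (l : List (Int × Int × Int)) : List (Int × Int × Int) :=
  PySem.List.insertBy
    (fun p q => decide (p.1 < q.1) || (!decide (q.1 < p.1) && decide (-p.2.2 < -q.2.2))) x l

-- A's combined list: values decorated with their key and consecutive indices from i
def pvDecor (k : Int → Int) : List Int → Int → List (Int × Int × Int)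
  | [], _ => []
  | x :: t, i => (k x, x, i) :: pvDecor k t (i + 1)

lemma pvZipDecor (k : Int → Int) (a : List Int) (i : Int) :
    List.zip (a.map k) (List.zip a (PySem.List.pyRange i (i + (a.length : Int)) 1)) =
      pvDecor k a i := by
  induction a generalizing i with
  | nil => simp [pvDecor]
  | cons x t ih =>
    rw [show ((x :: t).length : Int) = (t.length : Int) + 1 by push_cast [List.length_cons]; ring]
    rw [PySem.List.pyRange_one_cons (by omega : i < i + ((t.length : Int) + 1))]
    simp only [List.map_cons, List.zip_cons_cons, pvDecor]
    rw [show i + ((t.length : Int) + 1) = (i + 1) + (t.length : Int) by ring]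
    rw [ih (i + 1)]

lemma pvMapInsA (k : Int → Int) (x : Int) (i : Int) (acc : List (Int × Int × Int))
    (h : ∀ p ∈ acc, p.1 = k p.2.1 ∧ p.2.2 < i) :
    (pvInsA (k x, x, i) acc).map (fun p => p.2.1) = pvInsE k x (acc.map (fun p => p.2.1)) := by
  induction acc with
  | nil => simp [pvInsA, pvInsE, PySem.List.insertBy]
  | cons q qs ih =>
    obtain ⟨hq1, hq2⟩ := h q (List.mem_cons_self ..)
    have hb : (decide ((k x : Int) < q.1) ||
        (!decide (q.1 < k x) && decide (-i < -q.2.2)))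
        = decide (k x ≤ k q.2.1) := by
      rw [hq1]
      by_cases h1 : k x < k q.2.1 <;> by_cases h2 : k q.2.1 < k x <;>
        simp [h1, h2] <;> omega
    simp only [pvInsA, pvInsE, List.map_cons, PySem.List.insertBy] at ih ⊢
    simp only [hb]
    by_cases hc : k x ≤ k q.2.1
    · simp [hc]
    · simp only [hc, decide_false, Bool.false_eq_true, if_false, List.map_cons]
      rw [ih (fun p hp => h p (List.mem_cons_of_mem _ hp))]

lemma pvMemInsA (x p : Int × Int × Int) (acc : List (Int × Int × Int)) (hp : p ∈ pvInsA x acc) :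
    p = x ∨ p ∈ acc :=
  (PySem.List.mem_insertBy _ _ _ _).mp (by simpa [pvInsA] using hp)

lemma pvFoldA (k : Int → Int) (a : List Int) (i : Int) (acc : List (Int × Int × Int))
    (h : ∀ p ∈ acc, p.1 = k p.2.1 ∧ p.2.2 < i) :
    (List.foldl (fun l x => pvInsA x l) acc (pvDecor k a i)).map (fun p => p.2.1) =
      List.foldl (fun l x => pvInsE k x l) (acc.map (fun p => p.2.1)) a := by
  induction a generalizing i acc with
  | nil => simp [pvDecor]
  | cons x t ih =>
    simp only [pvDecor, List.foldl_cons]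
    have hinv : ∀ p ∈ pvInsA (k x, x, i) acc, p.1 = k p.2.1 ∧ p.2.2 < i + 1 := by
      intro p hp
      rcases pvMemInsA _ p _ hp with h1 | h1
      · subst h1; refine ⟨rfl, ?_⟩; simp only; omega
      · obtain ⟨ha, hb⟩ := h p h1; exact ⟨ha, by omega⟩
    rw [ih (i + 1) _ hinv, pvMapInsA k x i acc h]

-- the two insertion rules commute
lemma pvSwap (k : Int → Int) (x y : Int) (acc : List Int) :
    pvInsE k y (pvInsL k x acc) = pvInsL k x (pvInsE k y acc) := by
  induction acc with
  | nil =>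
    simp only [pvInsE, pvInsL, PySem.List.insertBy]
    split_ifs <;> simp_all
    omega
  | cons z zs ih =>
    simp only [pvInsE, pvInsL] at ih ⊢
    by_cases hxz : k x < k z
    · by_cases hyz : k y ≤ k z
      · by_cases hyx : k y ≤ k x
        · simp [PySem.List.insertBy, hxz, hyz, hyx, show ¬ k x < k y by omega]
        · simp [PySem.List.insertBy, hxz, hyz, hyx, show k x < k y by omega]
      · simp [PySem.List.insertBy, hxz, hyz, show ¬ k y ≤ k x by omega]
    · by_cases hyz : k y ≤ k z
      · simp [PySem.List.insertBy, hxz, hyz, show ¬ k x < k y by omega]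
      · simp [PySem.List.insertBy, hxz, hyz, ih]

lemma pvComm (k : Int → Int) (x : Int) (t : List Int) (acc : List Int) :
    List.foldl (fun l y => pvInsE k y l) (pvInsL k x acc) t =
      pvInsL k x (List.foldl (fun l y => pvInsE k y l) acc t) := by
  induction t generalizing acc with
  | nil => rfl
  | cons y t ih =>
    simp only [List.foldl_cons]
    rw [pvSwap k x y acc]
    exact ih _

lemma pvFoldrFoldl (k : Int → Int) (a : List Int) :
    List.foldr (fun x l => pvInsL k x l) [] a = List.foldl (fun l x => pvInsE k x l) [] a := by
  induction a with
  | nil => rfl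
  | cons x t ih =>
    simp only [List.foldr_cons, List.foldl_cons, ih]
    have h0 : pvInsE k x ([] : List Int) = pvInsL k x [] := by
      simp [pvInsE, pvInsL, PySem.List.insertBy]
    rw [h0]
    exact (pvComm k x t []).symm

lemma pvAEq (a : List Int) :
    digitDifferenceSort a =
      (List.foldl (fun l x => pvInsA x l) [] (pvDecor pvDigitKey a 0)).map (fun p => p.2.1) := by
  have hz := pvZipDecor pvDigitKey a 0
  rw [show (0 : Int) + (a.length : Int) = (a.length : Int) by ring] at hz
  simp only [digitDifferenceSort, List.map_map]
  rw [show ((fun d : List Int =>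
        ((PySem.List.max? d (fun x => x)).getD 0) - ((PySem.List.min? d (fun x => x)).getD 0)) ∘
      ((fun d : List Char => d.map (fun j => (PySem.Int.ofChars? [j]).getD 0)) ∘
        fun i => PySem.Int.toChars i)) = pvDigitKey from rfl]
  rw [hz]
  rfl

-- ---- the key is always one of 0..9 on nonnegative inputs ----

lemma pvToDigitsCoreMem (P : Char → Prop) (hP : ∀ m : Nat, m < 10 → P (Nat.digitChar m))
    (fuel : Nat) : ∀ (n : Nat) (acc : List Char), (∀ c ∈ acc, P c) →
    ∀ c ∈ Nat.toDigitsCore 10 fuel n acc, P c := by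
  induction fuel with
  | zero => intro n acc hacc c hc; exact hacc c hc
  | succ f ih =>
    intro n acc hacc c hc
    simp only [Nat.toDigitsCore] at hc
    split at hc
    · rcases List.mem_cons.mp hc with h1 | h1
      · subst h1; exact hP _ (Nat.mod_lt _ (by omega))
      · exact hacc c h1
    · refine ih _ _ ?_ c hc
      intro c' hc'
      rcases List.mem_cons.mp hc' with h1 | h1
      · subst h1; exact hP _ (Nat.mod_lt _ (by omega))
      · exact hacc c' h1

lemma pvDigitVal (c : Char)
    (hc : ∃ m : Nat, m < 10 ∧ c = Nat.digitChar m) :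
    0 ≤ (PySem.Int.ofChars? [c]).getD 0 ∧ (PySem.Int.ofChars? [c]).getD 0 ≤ 9 := by
  obtain ⟨m, hm, rfl⟩ := hc
  interval_cases m <;> decide

lemma pvMaxMinBound (l : List Int) (h : ∀ v ∈ l, 0 ≤ v ∧ v ≤ 9) :
    0 ≤ (PySem.List.max? l (fun x => x)).getD 0 - (PySem.List.min? l (fun x => x)).getD 0 ∧
      (PySem.List.max? l (fun x => x)).getD 0 - (PySem.List.min? l (fun x => x)).getD 0 ≤ 9 := by
  cases hmx : PySem.List.max? l (fun x => x) with
  | none =>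
    have hl : l = [] := (PySem.List.max?_eq_none_iff l _).mp hmx
    subst hl
    have hmn : PySem.List.min? ([] : List Int) (fun x => x) = none :=
      (PySem.List.min?_eq_none_iff _ _).mpr rfl
    rw [hmn]
    norm_num
  | some m =>
    cases hmn : PySem.List.min? l (fun x => x) with
    | none =>
      exfalso
      have hl : l = [] := (PySem.List.min?_eq_none_iff l _).mp hmn
      subst hl
      rw [(PySem.List.max?_eq_none_iff ([] : List Int) (fun x => x)).mpr rfl] at hmx
      cases hmx
    | some mn =>
      have hm := h m (PySem.List.max?_mem hmx)
      have hmn' := h mn (PySem.List.min?_mem hmn)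
      have hle : mn ≤ m := PySem.List.min?_isMin hmn m (PySem.List.max?_mem hmx)
      simp only [Option.getD_some]
      omega

lemma pvKeyBound (n : Int) (hn : 0 ≤ n) : 0 ≤ pvDigitKey n ∧ pvDigitKey n ≤ 9 := by
  have hch : ∀ c ∈ PySem.Int.toChars n, ∃ m : Nat, m < 10 ∧ c = Nat.digitChar m := by
    intro c hc
    simp only [PySem.Int.toChars, if_neg (by omega : ¬ n < 0), Nat.toDigits] at hc
    exact pvToDigitsCoreMem (fun c => ∃ m : Nat, m < 10 ∧ c = Nat.digitChar m)
      (fun m hm => ⟨m, hm, rfl⟩) _ _ [] (by simp) c hc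
  have hdv : ∀ v ∈ (PySem.Int.toChars n).map (fun c => (PySem.Int.ofChars? [c]).getD 0),
      0 ≤ v ∧ v ≤ 9 := by
    intro v hv
    rw [List.mem_map] at hv
    obtain ⟨c, hc, rfl⟩ := hv
    exact pvDigitVal c (hch c hc)
  unfold pvDigitKey
  exact pvMaxMinBound _ hdv

-- ---- inserting into a key-bucketed concatenation lands at the end of the right bucket ----

lemma pvInsSkip {α : Type} (before : α → α → Bool) (x : α) (l1 l2 : List α)
    (h : ∀ y ∈ l1, before x y = false) :
    PySem.List.insertBy before x (l1 ++ l2) = l1 ++ PySem.List.insertBy before x l2 := by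
  induction l1 with
  | nil => rfl
  | cons y ys ih =>
    simp only [List.cons_append, PySem.List.insertBy, h y (List.mem_cons_self ..),
      Bool.false_eq_true, if_false, List.cons_append]
    rw [ih (fun z hz => h z (List.mem_cons_of_mem _ hz))]

lemma pvInsFront {α : Type} (before : α → α → Bool) (x : α) (l : List α)
    (h : ∀ y ∈ l, before x y = true) :
    PySem.List.insertBy before x l = x :: l := by
  cases l with
  | nil => rfl
  | cons y ys => simp [PySem.List.insertBy, h y (List.mem_cons_self ..)]

lemma pvInsFlat (k : Int → Int) (x : Int) (ks : List Int) (f : Int → List Int)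
    (hs : ks.Pairwise (· < ·)) (hx : k x ∈ ks)
    (hf : ∀ d ∈ ks, ∀ y ∈ f d, k y = d) :
    pvInsL k x (ks.flatMap f) =
      ks.flatMap (fun d => f d ++ if k x = d then [x] else []) := by
  induction ks with
  | nil => cases hx
  | cons d rest ih =>
    rw [List.pairwise_cons] at hs
    simp only [List.flatMap_cons]
    by_cases hxd : k x = d
    · have hskip : ∀ y ∈ f d, (decide (k x < k y)) = false := by
        intro y hy
        have := hf d (List.mem_cons_self ..) y hy
        simp [this, hxd]
      have hfront : ∀ y ∈ rest.flatMap f, (decide (k x < k y)) = true := by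
        intro y hy
        rw [List.mem_flatMap] at hy
        obtain ⟨d', hd', hy'⟩ := hy
        have h1 := hf d' (List.mem_cons_of_mem _ hd') y hy'
        have h2 := hs.1 d' hd'
        simp [h1, hxd]; omega
      unfold pvInsL
      rw [pvInsSkip _ _ _ _ hskip, pvInsFront _ _ _ hfront]
      have hrest : rest.flatMap (fun d' => f d' ++ if k x = d' then [x] else []) =
          rest.flatMap f := by
        refine List.flatMap_congr ?_
        intro d' hd'
        have h2 := hs.1 d' hd'
        rw [if_neg (by omega)]
        simp
      rw [hrest, if_pos hxd]
      simp
    · have hxrest : k x ∈ rest := by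
        rcases List.mem_cons.mp hx with h1 | h1
        · exact absurd h1 hxd
        · exact h1
      have hskip : ∀ y ∈ f d, (decide (k x < k y)) = false := by
        intro y hy
        have h1 := hf d (List.mem_cons_self ..) y hy
        have h2 := hs.1 (k x) hxrest
        simp [h1]; omega
      unfold pvInsL
      rw [pvInsSkip _ _ _ _ hskip]
      rw [show PySem.List.insertBy (fun a b => decide (k a < k b)) x (rest.flatMap f) =
            pvInsL k x (rest.flatMap f) from rfl]
      rw [ih hs.2 hxrest (fun d' hd' => hf d' (List.mem_cons_of_mem _ hd'))]
      rw [if_neg hxd]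
      simp

-- ---- A's stable insertion process produces exactly B's bucket concatenation ----

lemma pvFoldrG (a : List Int) (h : ∀ x ∈ a, 0 ≤ x) :
    List.foldr (fun x l => pvInsL pvDigitKey x l) [] a =
      (PySem.List.pyRange 0 10 1).flatMap
        (fun d => a.reverse.filter (fun n => decide (pvDigitKey n = d))) := by
  induction a with
  | nil => simp
  | cons x t ih =>
    simp only [List.foldr_cons]
    rw [ih (fun y hy => h y (List.mem_cons_of_mem _ hy))]
    rw [pvInsFlat pvDigitKey x _ _ (PySem.List.pairwise_lt_pyRange_one 0 10)
      (by
        have := pvKeyBound x (h x (List.mem_cons_self ..))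
        rw [PySem.List.mem_pyRange_one]; omega)
      (by
        intro d _ y hy
        have := List.of_mem_filter hy
        simpa using this)]
    refine List.flatMap_congr ?_
    intro d _
    simp only [List.reverse_cons, List.filter_append, List.filter_cons, List.filter_nil]
    by_cases hxd : pvDigitKey x = d <;> simp [hxd]

lemma pvAltEq (a : List Int) :
    digitDifferenceSort_alt a =
      (PySem.List.pyRange 0 10 1).flatMap
        (fun d => a.reverse.filter (fun n => decide (pvDigitKey n = d))) := by
  unfold digitDifferenceSort_alt
  simp only [PySem.List.foldl_append_ite_eq_filter (fun n => pvDigitKey n = _)]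
  rw [PySem.List.foldl_append_eq_flatMap]
  simp

-- ===== VERDICT (by name: the statement is the Claim_ definition above) =====
theorem digitDifferenceSort_spec : Claim_equal_digitDifferenceSort := by
  intro a _ hpre
  unfold Spec_digitDifferenceSort
  rw [pvAEq a, pvAltEq a, ← pvFoldrG a hpre, pvFoldrFoldl]
  simpa using pvFoldA pvDigitKey a 0 [] (by intro p hp; cases hp)
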